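-- pv_equiv track=rewrite | github.com/Choi-Juno/BaekJoon | problems/01000/1003.py | count_zero_one
-- ===== SOURCE A (Python) =====
-- def count_zero_one(n):
--     if n == 0:
--         return (1, 0)  # 0이 1번, 1이 0번
--     if n == 1:
--         return (0, 1)  # 0이 0번, 1이 1번
--
--     # 피보나치 수열의 각 숫자에서 0과 1이 등장하는 횟수를 저장
--     dp = [(0, 0)] * (n + 1)
--     dp[0] = (1, 0)  # 0이 1번, 1이 0번
--     dp[1] = (0, 1)  # 0이 0번, 1이 1번
--
--     # 피보나치 수열을 계산하면서 0과 1의 등장 횟수도 함께 계산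
--     for i in range(2, n + 1):
--         # i번째 피보나치 수는 i-1번째와 i-2번째의 합
--         # 따라서 0과 1의 등장 횟수도 각각 더해줌
--         dp[i] = (dp[i - 1][0] + dp[i - 2][0], dp[i - 1][1] + dp[i - 2][1])
--
--     return dp[n]
-- ===== SOURCE B (Python) =====
-- def count_zero_one(n):
--     # fast doubling: fd(k) = (F(k), F(k+1)); zeros = F(n-1) = F(n+1)-F(n), ones = F(n)
--     def fd(k):
--         if k == 0:
--             return (0, 1)
--         a, b = fd(k // 2)
--         c = a * (2 * b - a)
--         d = a * a + b * b
--         if k % 2 == 1: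
--             return (d, c + d)
--         return (c, d)
--     a, b = fd(n)
--     return (b - a, a)
-- ===== Notes on version B (the rewrite author's own statement) =====
-- stated objective: faster
-- what changed: Replaces the O(n) dynamic-programming table of (zeros, ones) pairs by fast-doubling Fibonacci (the counts are F(n-1) and F(n)), computed in O(log n) multiplications.
import Mathlib
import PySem

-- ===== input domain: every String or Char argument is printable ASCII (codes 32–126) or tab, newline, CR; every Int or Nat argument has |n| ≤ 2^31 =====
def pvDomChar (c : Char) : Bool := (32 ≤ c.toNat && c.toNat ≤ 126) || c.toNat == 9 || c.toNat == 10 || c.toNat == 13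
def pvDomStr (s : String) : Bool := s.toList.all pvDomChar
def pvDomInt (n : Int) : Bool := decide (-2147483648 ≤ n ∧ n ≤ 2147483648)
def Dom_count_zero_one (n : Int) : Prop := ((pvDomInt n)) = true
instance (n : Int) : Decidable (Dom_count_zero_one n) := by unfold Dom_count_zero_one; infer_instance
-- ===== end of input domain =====

-- B replaces A's O(n) DP table of (zeros, ones) pairs by fast-doubling Fibonacci (O(log n)): the counts are F(n-1) and F(n).


-- ===== PORT A =====
-- loop body of Python's `for i in range(2, n+1)`; all indices are nonnegative and in
-- range under Pre_ (n ≥ 2 in this branch), so `.toNat` + set/getD is exact here.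
def stepA (dp : List (Int × Int)) (i : Int) : List (Int × Int) :=
  dp.set i.toNat
    ((dp.getD (i - 1).toNat (0, 0)).1 + (dp.getD (i - 2).toNat (0, 0)).1,
     (dp.getD (i - 1).toNat (0, 0)).2 + (dp.getD (i - 2).toNat (0, 0)).2)

def count_zero_one (n : Int) : List Int :=
  if n = 0 then [1, 0]
  else if n = 1 then [0, 1]
  else
    let dp := List.replicate (n + 1).toNat ((0 : Int), (0 : Int))
    let dp := dp.set 0 (1, 0)
    let dp := dp.set 1 (0, 1)
    let dp := (PySem.List.pyRange 2 (n + 1) 1).foldl stepA dp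
    [(dp.getD n.toNat (0, 0)).1, (dp.getD n.toNat (0, 0)).2]

-- ===== PORT B =====
-- fast doubling: pyFd k = (F(k), F(k+1))
def pyFd (k : Nat) : Int × Int :=
  if h : k = 0 then (0, 1)
  else
    let p := pyFd (k / 2)
    let a := p.1
    let b := p.2
    let c := a * (2 * b - a)
    let d := a * a + b * b
    if k % 2 = 1 then (d, c + d) else (c, d)
decreasing_by exact Nat.div_lt_self (Nat.pos_of_ne_zero h) one_lt_two

def count_zero_one_alt (n : Int) : List Int :=
  let p := pyFd n.toNat
  [p.2 - p.1, p.1]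

-- ===== PRECONDITION & SPEC =====
-- Python A raises IndexError for n < 0 (dp is an empty/negative-size list there).
def Pre_count_zero_one (n : Int) : Prop := 0 ≤ n
instance (n : Int) : Decidable (Pre_count_zero_one n) := by unfold Pre_count_zero_one; infer_instance
def pvWitness_count_zero_one : Int := (5)

def Spec_count_zero_one (n : Int) (out : List Int) : Prop := out = count_zero_one_alt n
instance (n : Int) (out : List Int) : Decidable (Spec_count_zero_one n out) := by unfold Spec_count_zero_one; infer_instance

-- ===== CLAIM (what is proved, stated in full; the proofs are below) =====
def Claim_equal_count_zero_one : Prop := ∀ (n : Int), Dom_count_zero_one n → Pre_count_zero_one n → Spec_count_zero_one n (count_zero_one n)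

-- ===== LEMMAS AND PROOFS =====

-- the value A's dp table holds at index j
def pairF (j : Nat) : Int × Int := ((Nat.fib (j + 1) : Int) - Nat.fib j, (Nat.fib j : Int))

theorem fib_cast_add_two (m : Nat) : (Nat.fib (m + 2) : Int) = Nat.fib m + Nat.fib (m + 1) := by
  exact_mod_cast congrArg (Nat.cast : Nat → Int) (Nat.fib_add_two)

theorem pyFd_eq (k : Nat) : pyFd k = ((Nat.fib k : Int), (Nat.fib (k + 1) : Int)) := by
  induction k using Nat.strong_induction_on with
  | _ k ih =>
    unfold pyFd
    split
    · rename_i h; subst h; simp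
    · rename_i h
      rw [ih (k / 2) (Nat.div_lt_self (Nat.pos_of_ne_zero h) one_lt_two)]
      rcases Nat.mod_two_eq_zero_or_one k with hm | hm
      · simp only [hm]
        norm_num
        have hk : k = 2 * (k / 2) := by omega
        generalize hM : k / 2 = M at hk ⊢
        subst hk
        have hle : Nat.fib M ≤ 2 * Nat.fib (M + 1) :=
          le_trans Nat.fib_le_fib_succ (by omega)
        refine ⟨?_, ?_⟩
        · rw [Nat.fib_two_mul, Nat.cast_mul, Nat.cast_sub hle]; push_cast; ring
        · rw [Nat.fib_two_mul_add_one]; push_cast; ring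
      · simp only [hm]
        norm_num
        have hk : k = 2 * (k / 2) + 1 := by omega
        generalize hM : k / 2 = M at hk ⊢
        subst hk
        have hle : Nat.fib M ≤ 2 * Nat.fib (M + 1) :=
          le_trans Nat.fib_le_fib_succ (by omega)
        have h2 : (Nat.fib (2 * M) : Int)
            = (Nat.fib M : Int) * (2 * Nat.fib (M + 1) - Nat.fib M) := by
          rw [Nat.fib_two_mul, Nat.cast_mul, Nat.cast_sub hle]; push_cast; ring
        have h3 : (Nat.fib (2 * M + 1) : Int)
            = (Nat.fib M : Int) * Nat.fib M + (Nat.fib (M + 1) : Int) * Nat.fib (M + 1) := by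
          rw [Nat.fib_two_mul_add_one]; push_cast; ring
        refine ⟨?_, ?_⟩
        · rw [h3]
        · linear_combination (-1 : Int) * fib_cast_add_two (2 * M) - h2 - h3

-- the initial table of A (for table size N+1)
def dpInit (N : Nat) : List (Int × Int) :=
  ((List.replicate (N + 1) ((0 : Int), (0 : Int))).set 0 (1, 0)).set 1 (0, 1)

theorem dpInit_length (N : Nat) : (dpInit N).length = N + 1 := by
  simp [dpInit]

theorem dpInit_eq (K : Nat) :
    dpInit (K + 1) = (1, 0) :: (0, 1) :: List.replicate K ((0 : Int), (0 : Int)) := by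
  simp [dpInit, List.replicate_succ]

theorem dpInit_getD_zero (N : Nat) (hN : 1 ≤ N) : (dpInit N).getD 0 (0, 0) = (1, 0) := by
  obtain ⟨K, rfl⟩ : ∃ K, N = K + 1 := ⟨N - 1, by omega⟩
  rw [dpInit_eq]; rfl

theorem dpInit_getD_one (N : Nat) (hN : 1 ≤ N) : (dpInit N).getD 1 (0, 0) = (0, 1) := by
  obtain ⟨K, rfl⟩ : ∃ K, N = K + 1 := ⟨N - 1, by omega⟩
  rw [dpInit_eq]; rfl

theorem loopA_inv (N : Nat) (hN : 2 ≤ N) :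
    ∀ (m : Nat), m + 2 ≤ N + 1 →
      ((PySem.List.pyRange 2 ((m : Int) + 2) 1).foldl stepA (dpInit N)).length = N + 1 ∧
      ∀ j : Nat, j ≤ m + 1 →
        ((PySem.List.pyRange 2 ((m : Int) + 2) 1).foldl stepA (dpInit N)).getD j (0, 0) = pairF j := by
  intro m
  induction m with
  | zero =>
    intro _
    rw [PySem.List.pyRange_one_eq_nil (by norm_num)]
    simp only [List.foldl_nil]
    refine ⟨dpInit_length N, ?_⟩
    intro j hj
    interval_cases j
    · rw [dpInit_getD_zero N (by omega)]; simp [pairF]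
    · rw [dpInit_getD_one N (by omega)]; simp [pairF]
  | succ m ih =>
    intro hm
    obtain ⟨ihl, ihv⟩ := ih (by omega)
    have hsplit : PySem.List.pyRange 2 ((((m : Nat) + 1 : Nat) : Int) + 2) 1
        = PySem.List.pyRange 2 ((m : Int) + 2) 1 ++ [(m : Int) + 2] := by
      have : ((((m : Nat) + 1 : Nat) : Int) + 2) = ((m : Int) + 2) + 1 := by push_cast; ring
      rw [this, PySem.List.pyRange_one_succ_right (by omega)]
    rw [hsplit, List.foldl_append]
    set dp := (PySem.List.pyRange 2 ((m : Int) + 2) 1).foldl stepA (dpInit N) with hdp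
    simp only [List.foldl_cons, List.foldl_nil]
    have ht0 : ((m : Int) + 2).toNat = m + 2 := by omega
    have ht1 : ((m : Int) + 2 - 1).toNat = m + 1 := by omega
    have ht2 : ((m : Int) + 2 - 2).toNat = m := by omega
    have hread1 : dp.getD (m + 1) (0, 0) = pairF (m + 1) := ihv (m + 1) (by omega)
    have hread2 : dp.getD m (0, 0) = pairF m := ihv m (by omega)
    have e1 : (Nat.fib (m + 2) : Int) = Nat.fib m + Nat.fib (m + 1) := fib_cast_add_two m
    have e2 : (Nat.fib (m + 3) : Int) = Nat.fib (m + 1) + Nat.fib (m + 2) := by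
      have h := fib_cast_add_two (m + 1)
      rw [show m + 1 + 2 = m + 3 from by omega, show m + 1 + 1 = m + 2 from by omega] at h
      exact h
    have hval : ((dp.getD (m + 1) (0, 0)).1 + (dp.getD m (0, 0)).1,
                 (dp.getD (m + 1) (0, 0)).2 + (dp.getD m (0, 0)).2) = pairF (m + 2) := by
      rw [hread1, hread2]
      simp only [pairF, Prod.mk.injEq]
      rw [show m + 1 + 1 = m + 2 from by omega, show m + 2 + 1 = m + 3 from by omega]
      refine ⟨?_, ?_⟩
      · linear_combination e1 - e2
      · linear_combination -e1
    have hstep : stepA dp ((m : Int) + 2) = dp.set (m + 2) (pairF (m + 2)) := by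
      simp only [stepA]
      rw [ht0, ht1, ht2, hval]
    rw [hstep]
    have hlen : (dp.set (m + 2) (pairF (m + 2))).length = N + 1 := by
      rw [List.length_set, ihl]
    refine ⟨hlen, ?_⟩
    intro j hj
    by_cases hje : j = m + 2
    · subst hje
      have hlt : m + 2 < dp.length := by omega
      simp [List.getD, hlt]
    · have : (dp.set (m + 2) (pairF (m + 2))).getD j (0, 0) = dp.getD j (0, 0) := by
        simp [List.getD, List.getElem?_set_ne (by omega : m + 2 ≠ j)]
      rw [this]
      exact ihv j (by omega)

-- ===== VERDICT (by name: the statement is the Claim_ definition above) =====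
theorem count_zero_one_spec : Claim_equal_count_zero_one := by
  intro n _ hpre
  unfold Spec_count_zero_one
  by_cases h0 : n = 0
  · subst h0
    norm_num [count_zero_one, count_zero_one_alt, pyFd_eq, Nat.fib_zero, Nat.fib_one]
  by_cases h1 : n = 1
  · subst h1
    norm_num [count_zero_one, count_zero_one_alt, pyFd_eq, Nat.fib_one, Nat.fib_two]
  have hn2 : 2 ≤ n := by
    unfold Pre_count_zero_one at hpre; omega
  set N := n.toNat with hNdef
  have hN : 2 ≤ N := by omega
  have hcast : (N : Int) = n := by omega
  obtain ⟨_, hval⟩ := loopA_inv N hN (N - 1) (by omega)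
  have hrange : ((((N : Nat) - 1 : Nat) : Int) + 2) = n + 1 := by omega
  rw [hrange] at hval
  have hsize : (n + 1).toNat = N + 1 := by omega
  have hA : count_zero_one n = [(pairF N).1, (pairF N).2] := by
    unfold count_zero_one
    rw [if_neg h0, if_neg h1]
    simp only [hsize]
    show [(((PySem.List.pyRange 2 (n + 1) 1).foldl stepA (dpInit N)).getD n.toNat (0, 0)).1,
          (((PySem.List.pyRange 2 (n + 1) 1).foldl stepA (dpInit N)).getD n.toNat (0, 0)).2]
        = [(pairF N).1, (pairF N).2]
    rw [show n.toNat = N from rfl, hval N (by omega)]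
  have hB : count_zero_one_alt n = [(pairF N).1, (pairF N).2] := by
    unfold count_zero_one_alt
    simp only [← hNdef, pyFd_eq, pairF]
  rw [hA, hB]
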